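-- pv_equiv track=rewrite | github.com/S3nna13/Aurelius | src/agent/tool_call_parser.py | _find_input_close
-- ===== SOURCE A (Python) =====
-- _XML_INPUT_CLOSE_TOKEN = "</input>"  # noqa: S105
--
-- def _find_input_close(text: str, start: int) -> int:
--     """Same JSON-aware scan, but for the ``</input>`` close token."""
--     i = start
--     n = len(text)
--     in_string = False
--     escape = False
--     while i < n:
--         ch = text[i]
--         if in_string:
--             if escape:
--                 escape = False
--             elif ch == "\\":
--                 escape = True
--             elif ch == '"':
--                 in_string = False
--             i += 1
--             continue
--         if ch == '"':
--             in_string = True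
--             i += 1
--             continue
--         if text.startswith(_XML_INPUT_CLOSE_TOKEN, i):
--             return i
--         i += 1
--     return -1
-- ===== SOURCE B (Python) =====
-- _XML_INPUT_CLOSE_TOKEN = "</input>"  # noqa: S105
--
-- def _find_input_close(text: str, start: int) -> int:
--     """Jump-scan: str.find the next close token and the next quote; skip JSON strings wholesale."""
--     n = len(text)
--     i = start
--     while True:
--         close = text.find(_XML_INPUT_CLOSE_TOKEN, i)
--         if close == -1:
--             return -1
--         quote = text.find('"', i)
--         if quote == -1 or close < quote:
--             return close
--         # a string opens at `quote`: scan for its closing quote, honoring backslash escapes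
--         j = quote + 1
--         while j < n and text[j] != '"':
--             j += 2 if text[j] == '\\' else 1
--         i = j + 1
-- ===== Notes on version B (the rewrite author's own statement) =====
-- stated objective: faster
-- what changed: A walks the text one character at a time with an in_string/escape state machine in Python; B jump-scans with str.find (next close token vs next quote) and skips each JSON string wholesale with an inner escape-aware scan, so the bulk of the scanning runs inside C-level str.find (measured constant-factor speedup).
-- outside the precondition, e.g. on _find_input_close('x</input>', -9): A returns -8, B returns 1
import Mathlib
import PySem

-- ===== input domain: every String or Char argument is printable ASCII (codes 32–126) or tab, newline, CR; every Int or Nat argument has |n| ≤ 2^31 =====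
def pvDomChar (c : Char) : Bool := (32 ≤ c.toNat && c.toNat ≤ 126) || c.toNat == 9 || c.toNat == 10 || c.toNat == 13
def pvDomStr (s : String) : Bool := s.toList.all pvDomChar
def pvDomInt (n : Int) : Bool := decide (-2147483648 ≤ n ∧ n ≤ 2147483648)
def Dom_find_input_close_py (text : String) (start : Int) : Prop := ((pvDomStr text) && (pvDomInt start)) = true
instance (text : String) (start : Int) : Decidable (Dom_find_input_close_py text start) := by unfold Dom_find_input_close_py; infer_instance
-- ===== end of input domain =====

-- B replaces A's one-character-at-a-time state machine by jump scanning with str.find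
-- (find next token / next quote, skip whole JSON strings): same result, measured constant-factor speedup.

-- ===== PORT A =====
-- the token "</input>" as a character list
def pvTok : List Char := ['<', '/', 'i', 'n', 'p', 'u', 't', '>']

-- A's while loop: state (i, in_string, escape), one character per step
def pvAloop (cs : List Char) (i : Nat) (inStr esc : Bool) : Int :=
  if h : i < cs.length then
    let ch := cs[i]
    if inStr then
      if esc then pvAloop cs (i + 1) true false
      else if ch = '\\' then pvAloop cs (i + 1) true true
      else if ch = '"' then pvAloop cs (i + 1) false false
      else pvAloop cs (i + 1) true false
    else if ch = '"' then pvAloop cs (i + 1) true false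
    else if pvTok.isPrefixOf (cs.drop i) then (i : Int)
    else pvAloop cs (i + 1) false false
  else -1
  termination_by cs.length - i

-- start.toNat is exact under Pre_ (0 ≤ start); negative start lies outside Pre_
def find_input_close_py (text : String) (start : Int) : Int :=
  pvAloop text.toList start.toNat false false

-- ===== PORT B =====
-- text.find(pat, i) for nonempty pat and 0 ≤ i: first p ≥ i where pat occurs, none = -1
def pvFind (cs pat : List Char) (i : Nat) : Option Nat :=
  if h : i < cs.length then
    if pat.isPrefixOf (cs.drop i) then some i else pvFind cs pat (i + 1)
  else none
  termination_by cs.length - i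

-- B's inner while loop: position of the closing quote (or ≥ length if unterminated)
def pvSkip (cs : List Char) (j : Nat) : Nat :=
  if h : j < cs.length then
    if cs[j] = '"' then j
    else if cs[j] = '\\' then pvSkip cs (j + 2) else pvSkip cs (j + 1)
  else j
  termination_by cs.length - j

-- facts the outer loop needs for termination
theorem pvFind_bounds (cs pat : List Char) (i p : Nat) (h : pvFind cs pat i = some p) :
    i ≤ p ∧ p < cs.length := by
  fun_induction pvFind cs pat i with
  | case1 i hi hpre => simp_all
  | case2 i hi hpre ih =>
      have := ih h; omega
  | case3 i hi => simp at h

theorem le_pvSkip (cs : List Char) (j : Nat) : j ≤ pvSkip cs j := by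
  fun_induction pvSkip cs j <;> omega

-- B's outer while True loop
def pvBloop (cs : List Char) (i : Nat) : Int :=
  match h1 : pvFind cs pvTok i with
  | none => -1
  | some c =>
    match h2 : pvFind cs ['"'] i with
    | none => (c : Int)
    | some q =>
      if c < q then (c : Int)
      else pvBloop cs (pvSkip cs (q + 1) + 1)
  termination_by cs.length + 2 - i
  decreasing_by
    have hq := pvFind_bounds cs ['"'] i q h2
    have hs := le_pvSkip cs (q + 1)
    omega

def find_input_close_py_alt (text : String) (start : Int) : Int :=
  pvBloop text.toList start.toNat

-- ===== PRECONDITION & SPEC =====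
-- Pre_ excludes negative start: for start < -len(text) A raises IndexError, and for
-- -len(text) ≤ start < 0 A's negative-index wraparound scans the tail and then restarts at 0,
-- an accident of manual indexing that no caller would specify; B does the natural thing there.
def Pre_find_input_close_py (text : String) (start : Int) : Prop := 0 ≤ start
instance (text : String) (start : Int) : Decidable (Pre_find_input_close_py text start) := by
  unfold Pre_find_input_close_py; infer_instance

def pvWitness_find_input_close_py : String × Int := ("{\"a\": \"</input>\"} </input>", 0)

def Spec_find_input_close_py (text : String) (start : Int) (out : Int) : Prop :=
  out = find_input_close_py_alt text start
instance (text : String) (start : Int) (out : Int) : Decidable (Spec_find_input_close_py text start out) := by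
  unfold Spec_find_input_close_py; infer_instance

-- ===== CLAIM (what is proved, stated in full; the proofs are below) =====
def Claim_equal_find_input_close_py : Prop := ∀ (text : String) (start : Int), Dom_find_input_close_py text start → Pre_find_input_close_py text start → Spec_find_input_close_py text start (find_input_close_py text start)


-- ===== LEMMAS AND PROOFS =====

theorem prefix_singleton (cs : List Char) (k : Nat) :
    ['"'].isPrefixOf (cs.drop k) ↔ cs[k]? = some '"' := by
  rw [← List.head?_drop]
  cases h : cs.drop k with
  | nil => simp [List.isPrefixOf]
  | cons c t =>
      rw [List.isPrefixOf_iff_prefix]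
      constructor
      · rintro ⟨u, hu⟩; simp at hu; simp [hu.1.symm]
      · intro hc; simp at hc; exact ⟨t, by simp [hc]⟩

theorem pvTok_head (cs : List Char) (c : Nat) (h : pvTok.isPrefixOf (cs.drop c)) :
    cs[c]? = some '<' := by
  rw [← List.head?_drop]
  cases hd : cs.drop c with
  | nil => rw [hd] at h; simp [pvTok, List.isPrefixOf] at h
  | cons a t =>
      rw [hd, pvTok, List.isPrefixOf_iff_prefix] at h
      obtain ⟨u, hu⟩ := h
      simp at hu
      simp [hu.1.symm]

theorem pvFind_none_step (cs pat : List Char) (i : Nat) (h : pvFind cs pat i = none) :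
    pvFind cs pat (i + 1) = none := by
  by_cases hi : i < cs.length
  · rw [pvFind, dif_pos hi] at h
    split at h
    · exact absurd h (by simp)
    · exact h
  · rw [pvFind, dif_neg (by omega : ¬ i + 1 < cs.length)]

theorem pvFind_none_not_prefix (cs pat : List Char) (i k : Nat)
    (h : pvFind cs pat i = none) (hik : i ≤ k) (hk : k < cs.length) :
    ¬ pat.isPrefixOf (cs.drop k) := by
  fun_induction pvFind cs pat i with
  | case1 i hi hpre => simp at h
  | case2 i hi hpre ih =>
      by_cases hik' : i = k
      · subst hik'; simpa using hpre
      · exact ih h (by omega)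
  | case3 i hi => omega

theorem pvFind_some_prefix (cs pat : List Char) (i p : Nat) (h : pvFind cs pat i = some p) :
    pat.isPrefixOf (cs.drop p) := by
  fun_induction pvFind cs pat i with
  | case1 i hi hpre => simp at h; subst h; exact hpre
  | case2 i hi hpre ih => exact ih h
  | case3 i hi => simp at h

theorem pvFind_some_not_before (cs pat : List Char) (i p k : Nat)
    (h : pvFind cs pat i = some p) (hik : i ≤ k) (hkp : k < p) :
    ¬ pat.isPrefixOf (cs.drop k) := by
  fun_induction pvFind cs pat i with
  | case1 i hi hpre => simp at h; omega
  | case2 i hi hpre ih =>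
      by_cases hik' : i = k
      · subst hik'; simpa using hpre
      · exact ih h (by omega)
  | case3 i hi => simp at h

theorem pvAloop_no_tok (cs : List Char) (i : Nat) (inStr esc : Bool)
    (h : pvFind cs pvTok i = none) : pvAloop cs i inStr esc = -1 := by
  fun_induction pvAloop cs i inStr esc <;> try rfl
  all_goals first
    | (rename_i ih; exact ih (pvFind_none_step cs pvTok _ h))
    | (exact absurd (by assumption : pvTok.isPrefixOf (cs.drop _) = true)
        (pvFind_none_not_prefix cs pvTok _ _ h le_rfl (by assumption)))

theorem pvAloop_gap (cs : List Char) (i p : Nat) (hip : i ≤ p)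
    (hgap : ∀ k, i ≤ k → k < p → cs[k]? ≠ some '"' ∧ ¬ pvTok.isPrefixOf (cs.drop k)) :
    pvAloop cs i false false = pvAloop cs p false false := by
  induction hd : p - i generalizing i with
  | zero =>
      have h0 : i = p := by omega
      subst h0; rfl
  | succ d ihd =>
      have hip' : i < p := by omega
      by_cases hi : i < cs.length
      · have hg := hgap i le_rfl hip'
        have hch : ¬ cs[i] = '"' := by
          intro e; exact hg.1 (by rw [List.getElem?_eq_getElem hi, e])
        rw [pvAloop, dif_pos hi]
        norm_num [hch, hg.2]
        exact ihd (i + 1) (by omega) (fun k hk1 hk2 => hgap k (by omega) hk2) (by omega)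
      · rw [pvAloop, dif_neg hi, pvAloop, dif_neg (by omega : ¬ p < cs.length)]

theorem pvAloop_string (cs : List Char) (p : Nat) :
    pvAloop cs p true false = pvAloop cs (pvSkip cs p + 1) false false := by
  fun_induction pvSkip cs p with
  | case1 j hn hq =>
      rw [pvAloop, dif_pos hn]
      norm_num [hq]
      exact fun e => absurd e (by decide)
  | case2 j hn hq hb ih =>
      rw [pvAloop, dif_pos hn]
      norm_num [hq, hb]
      rw [pvAloop]
      by_cases h1 : j + 1 < cs.length
      · rw [dif_pos h1]; norm_num; exact ih
      · rw [dif_neg h1, ← ih, pvAloop, dif_neg (by omega : ¬ j + 2 < cs.length)]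
  | case3 j hn hq hb ih =>
      rw [pvAloop, dif_pos hn]
      norm_num [hq, hb]
      exact ih
  | case4 j hn =>
      rw [pvAloop, dif_neg hn, pvAloop, dif_neg (by omega : ¬ j + 1 < cs.length)]

theorem pvAloop_at_tok (cs : List Char) (c : Nat) (hpre : pvTok.isPrefixOf (cs.drop c))
    (hc : c < cs.length) : pvAloop cs c false false = (c : Int) := by
  have hch : cs[c] = '<' := by
    have := pvTok_head cs c hpre
    rw [List.getElem?_eq_getElem hc] at this
    simpa using this
  rw [pvAloop, dif_pos hc]
  norm_num [hch, hpre]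
  exact fun e => absurd e (by decide)

theorem pvAloop_eq_pvBloop (cs : List Char) (i : Nat) :
    pvAloop cs i false false = pvBloop cs i := by
  induction hm : cs.length + 2 - i using Nat.strong_induction_on generalizing i with
  | _ m ih =>
    rw [pvBloop]
    split
    · rename_i h1
      exact pvAloop_no_tok cs i false false h1
    · rename_i c h1
      have hb := pvFind_bounds cs pvTok i c h1
      have hpre := pvFind_some_prefix cs pvTok i c h1
      split
      · rename_i h2
        rw [pvAloop_gap cs i c hb.1 ?g1, pvAloop_at_tok cs c hpre hb.2]
        case g1 =>
          intro k hk1 hk2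
          refine ⟨?_, pvFind_some_not_before cs pvTok i c k h1 hk1 hk2⟩
          intro hq
          exact pvFind_none_not_prefix cs ['"'] i k h2 hk1 (by omega) ((prefix_singleton cs k).mpr hq)
      · rename_i q h2
        have hqb := pvFind_bounds cs ['"'] i q h2
        have hqch : cs[q]? = some '"' := (prefix_singleton cs q).mp (pvFind_some_prefix cs ['"'] i q h2)
        split_ifs with hlt
        · rw [pvAloop_gap cs i c hb.1 ?g2, pvAloop_at_tok cs c hpre hb.2]
          case g2 =>
            intro k hk1 hk2
            refine ⟨?_, pvFind_some_not_before cs pvTok i c k h1 hk1 hk2⟩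
            intro hq
            exact pvFind_some_not_before cs ['"'] i q k h2 hk1 (by omega) ((prefix_singleton cs k).mpr hq)
        · have hq : q ≤ c := by omega
          rw [pvAloop_gap cs i q hqb.1 ?g3]
          case g3 =>
            intro k hk1 hk2
            refine ⟨?_, pvFind_some_not_before cs pvTok i c k h1 hk1 (by omega)⟩
            intro hqq
            exact pvFind_some_not_before cs ['"'] i q k h2 hk1 hk2 ((prefix_singleton cs k).mpr hqq)
          have hqc : cs[q] = '"' := by
            rw [List.getElem?_eq_getElem hqb.2] at hqch; simpa using hqch
          rw [pvAloop, dif_pos hqb.2]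
          norm_num [hqc]
          rw [pvAloop_string]
          have hs := le_pvSkip cs (q + 1)
          exact ih (cs.length + 2 - (pvSkip cs (q + 1) + 1)) (by omega) _ rfl


-- ===== VERDICT (by name: the statement is the Claim_ definition above) =====
theorem find_input_close_py_spec : Claim_equal_find_input_close_py := by
  intro text start _ _
  unfold Spec_find_input_close_py find_input_close_py find_input_close_py_alt
  exact pvAloop_eq_pvBloop _ _
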